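-- pv_equiv track=rewrite | github.com/dominicattal/codecontest | acmgnyr/2025/C-Arod/solutions/arknave.py | solve
-- ===== SOURCE A (Python) =====
-- import math
--
-- ACUTE = 0
--
-- RIGHT = 1
--
-- OBTUSE = 2
--
-- def nc3(x):
--     return x * (x - 1) * (x - 2) // 6
--
-- def count_side_side(ways, w, h):
--     for x in range(1, w):
--         num = x * x + h * h - w * x
--         den = h
--
--         v = max(0, min(h, num // den))
--
--         counts = [max(0, v), 0, max(0, h - 1 - v)]
--         if 0 < v < h and num % den == 0:
--             assert counts[0] > 0
--             counts[1] += 1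
--             counts[0] -= 1
--
--         ways[RIGHT] += 4 * counts[1]
--         ways[OBTUSE] += 4 * counts[2]
--
-- def solve(max_x, max_y):
--     """
--     Runs in O(XY(X + Y)).
--     """
--     # Counts of each triangle
--     cats = [0, 0, 0, 0]
--     for w in range(1, max_x + 1):
--         for h in range(1, max_y + 1):
--             triangles = 0
--             ways = [0, 0, 0, 0]
--
--             # 1. Use 3 corners
--             # 4 triangles, 2 ways each to orient
--             triangles += 4
--             ways[RIGHT] += 4
--
--             # 2. Use 2 opposite corners.
--             # Cannot use any other corner or point on the main diagonal
--             g = math.gcd(w, h)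
--             num_points = (w + 1) * (h + 1) - (g + 1) - 2
--             triangles += num_points * 2
--             ways[OBTUSE] += num_points * 2
--
--             # 3. Use 2 same side corners
--             triangles += 2 * (w - 1)
--             for x in range(1, w):
--                 dot = x * x + h * h - w * x
--                 if dot < 0:
--                     ways[OBTUSE] += 2
--                 elif dot == 0:
--                     ways[RIGHT] += 2
--             triangles += 2 * (h - 1)
--             for y in range(1, h):
--                 dot = y * y + w * w - h * y
--                 if dot < 0:
--                     ways[OBTUSE] += 2
--                 elif dot == 0:
--                     ways[RIGHT] += 2
--
--             count_side_side(ways, w, h)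
--             count_side_side(ways, h, w)
--
--             triangles += 4 * (w - 1) * (h - 1)
--
--             ways[ACUTE] = triangles - ways[RIGHT] - ways[OBTUSE]
--
--             placements = (max_x + 1 - w) * (max_y + 1 - h)
--             for d in range(4):
--                 cats[d] += ways[d] * placements
--
--     cats[-1] = nc3((max_x + 1) * (max_y + 1)) - sum(cats)
--     return cats
-- ===== SOURCE B (Python) =====
-- import math
--
-- def _quad_lt(lo, hi, b, c):
--     # number of integers x in [lo, hi] with x*x + b*x + c < 0,
--     # i.e. (2x+b)^2 < D where D = b*b - 4*c
--     D = b * b - 4 * c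
--     if D <= 0:
--         return 0
--     t = math.isqrt(D - 1)          # |2x+b| <= t  <=>  (2x+b)^2 <= D-1  <=>  (2x+b)^2 < D
--     lo2 = max(lo, -((t + b) // 2))
--     hi2 = min(hi, (t - b) // 2)
--     return max(0, hi2 - lo2 + 1)
--
-- def _quad_eq(lo, hi, b, c):
--     # number of integers x in [lo, hi] with x*x + b*x + c == 0
--     D = b * b - 4 * c
--     if D < 0:
--         return 0
--     s = math.isqrt(D)
--     if s * s != D or (s - b) % 2 != 0:
--         return 0
--     r1 = (-b - s) // 2
--     r2 = (-b + s) // 2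
--     cnt = 1 if lo <= r1 <= hi else 0
--     if r2 != r1 and lo <= r2 <= hi:
--         cnt += 1
--     return cnt
--
-- def solve(max_x, max_y):
--     cats = [0, 0, 0, 0]
--     for w in range(1, max_x + 1):
--         for h in range(1, max_y + 1):
--             g = math.gcd(w, h)
--             diag = (w + 1) * (h + 1) - (g + 1) - 2
--             right = 4 + 2 * _quad_eq(1, w - 1, -w, h * h) + 2 * _quad_eq(1, h - 1, -h, w * w)
--             obtuse = 2 * diag + 2 * _quad_lt(1, w - 1, -w, h * h) + 2 * _quad_lt(1, h - 1, -h, w * w)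
--             # side-side pairs, counted per interior row instead of per column:
--             for y in range(1, h):
--                 obtuse += 4 * _quad_lt(1, w - 1, -w, h * h - h * y)
--                 right += 4 * _quad_eq(1, w - 1, -w, h * h - h * y)
--             for y in range(1, w):
--                 obtuse += 4 * _quad_lt(1, h - 1, -h, w * w - w * y)
--                 right += 4 * _quad_eq(1, h - 1, -h, w * w - w * y)
--             triangles = 4 + 2 * diag + 2 * (w - 1) + 2 * (h - 1) + 4 * (w - 1) * (h - 1)
--             p = (max_x + 1 - w) * (max_y + 1 - h)
--             cats[0] += (triangles - right - obtuse) * p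
--             cats[1] += right * p
--             cats[2] += obtuse * p
--     n = (max_x + 1) * (max_y + 1)
--     cats[3] = n * (n - 1) * (n - 2) // 6 - (cats[0] + cats[1] + cats[2])
--     return cats
-- ===== Notes on version B (the rewrite author's own statement) =====
-- stated objective: alternative
-- what changed: Per rectangle, the per-column floor/clamp scans (the two corner-pair loops and count_side_side's inner bookkeeping) are replaced by closed-form counting of integer solutions of quadratic inequalities/equations via integer square roots: the corner loops disappear entirely and the side-side count is done per interior row with an O(1) isqrt formula instead of per column with floor/clamp case analysis.
import Mathlib
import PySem

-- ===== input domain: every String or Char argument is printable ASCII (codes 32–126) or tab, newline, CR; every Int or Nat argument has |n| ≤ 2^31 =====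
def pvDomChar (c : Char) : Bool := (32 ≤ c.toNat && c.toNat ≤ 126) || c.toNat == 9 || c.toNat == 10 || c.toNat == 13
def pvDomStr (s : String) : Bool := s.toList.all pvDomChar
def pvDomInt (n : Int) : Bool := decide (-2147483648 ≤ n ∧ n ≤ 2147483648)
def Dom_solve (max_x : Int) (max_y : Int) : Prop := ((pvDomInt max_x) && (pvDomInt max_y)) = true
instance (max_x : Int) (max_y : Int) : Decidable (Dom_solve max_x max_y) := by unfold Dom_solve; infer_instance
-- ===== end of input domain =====

-- B replaces A's per-column floor/clamp scans by closed-form quadratic-inequality counting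
-- with integer square roots (corner loops become O(1) formulas; side-side counted per row):
-- a structurally different algorithm of comparable cost.


-- ===== PORT A =====
def nc3 (x : Int) : Int := PySem.Int.floordiv (x * (x - 1) * (x - 2)) 6

-- Python's fixed 4-slot lists 'ways'/'cats' are ported as 4-tuples (acute, right, obtuse, spare).
def count_side_side (ways : Int × Int × Int × Int) (w : Int) (h : Int) : Int × Int × Int × Int :=
  (PySem.List.pyRange 1 w 1).foldl (fun ws x =>
    let num := x * x + h * h - w * x
    let den := h
    let v := max 0 (min h (PySem.Int.floordiv num den))
    let c1 : Int := 0
    let c2 := max 0 (h - 1 - v)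
    let c1 := if 0 < v ∧ v < h ∧ PySem.Int.mod num den = 0 then c1 + 1 else c1
    (ws.1, ws.2.1 + 4 * c1, ws.2.2.1 + 4 * c2, ws.2.2.2)) ways

def solve (max_x : Int) (max_y : Int) : List Int :=
  let cats : Int × Int × Int × Int := (0, 0, 0, 0)
  let cats := (PySem.List.pyRange 1 (max_x + 1) 1).foldl (fun cats w =>
    (PySem.List.pyRange 1 (max_y + 1) 1).foldl (fun cats h =>
      let triangles : Int := 0
      let ways : Int × Int × Int × Int := (0, 0, 0, 0)
      let triangles := triangles + 4
      let ways := (ways.1, ways.2.1 + 4, ways.2.2.1, ways.2.2.2)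
      let g : Int := Int.gcd w h        -- math.gcd, exact here (w, h ≥ 1)
      let num_points := (w + 1) * (h + 1) - (g + 1) - 2
      let triangles := triangles + num_points * 2
      let ways := (ways.1, ways.2.1, ways.2.2.1 + num_points * 2, ways.2.2.2)
      let triangles := triangles + 2 * (w - 1)
      let ways := (PySem.List.pyRange 1 w 1).foldl (fun ws x =>
        let dot := x * x + h * h - w * x
        if dot < 0 then (ws.1, ws.2.1, ws.2.2.1 + 2, ws.2.2.2)
        else if dot = 0 then (ws.1, ws.2.1 + 2, ws.2.2.1, ws.2.2.2)
        else ws) ways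
      let triangles := triangles + 2 * (h - 1)
      let ways := (PySem.List.pyRange 1 h 1).foldl (fun ws y =>
        let dot := y * y + w * w - h * y
        if dot < 0 then (ws.1, ws.2.1, ws.2.2.1 + 2, ws.2.2.2)
        else if dot = 0 then (ws.1, ws.2.1 + 2, ws.2.2.1, ws.2.2.2)
        else ws) ways
      let ways := count_side_side ways w h
      let ways := count_side_side ways h w
      let triangles := triangles + 4 * (w - 1) * (h - 1)
      let ways := (triangles - ways.2.1 - ways.2.2.1, ways.2.1, ways.2.2.1, ways.2.2.2)
      let placements := (max_x + 1 - w) * (max_y + 1 - h)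
      (cats.1 + ways.1 * placements, cats.2.1 + ways.2.1 * placements,
       cats.2.2.1 + ways.2.2.1 * placements, cats.2.2.2 + ways.2.2.2 * placements)) cats) cats
  [cats.1, cats.2.1, cats.2.2.1,
   nc3 ((max_x + 1) * (max_y + 1)) - (cats.1 + cats.2.1 + cats.2.2.1 + cats.2.2.2)]

-- ===== PORT B =====
-- math.isqrt ported by hand (PySem has no isqrt): fuel-driven binary search, exact for every
-- Nat argument (spec proved in isqrt_spec below).
def isqrtAux (n : Nat) : Nat → Nat → Nat → Nat
  | 0, lo, _hi => lo
  | fuel + 1, lo, hi =>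
    let m := (lo + hi) / 2
    if m = lo then lo
    else if m * m ≤ n then isqrtAux n fuel m hi
    else isqrtAux n fuel lo m

def isqrt (n : Nat) : Nat := isqrtAux n (n + 1) 0 (n + 1)

def quadLt (lo : Int) (hi : Int) (b : Int) (c : Int) : Int :=
  let D := b * b - 4 * c
  if D ≤ 0 then 0
  else
    let t : Int := (isqrt (D - 1).toNat : Int)   -- math.isqrt, exact (D - 1 ≥ 0)
    let lo2 := max lo (-(PySem.Int.floordiv (t + b) 2))
    let hi2 := min hi (PySem.Int.floordiv (t - b) 2)
    max 0 (hi2 - lo2 + 1)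

def quadEq (lo : Int) (hi : Int) (b : Int) (c : Int) : Int :=
  let D := b * b - 4 * c
  if D < 0 then 0
  else
    let s : Int := (isqrt D.toNat : Int)         -- math.isqrt, exact (D ≥ 0)
    if s * s ≠ D ∨ PySem.Int.mod (s - b) 2 ≠ 0 then 0
    else
      let r1 := PySem.Int.floordiv (-b - s) 2
      let r2 := PySem.Int.floordiv (-b + s) 2
      let cnt : Int := if lo ≤ r1 ∧ r1 ≤ hi then 1 else 0
      if r2 ≠ r1 ∧ lo ≤ r2 ∧ r2 ≤ hi then cnt + 1 else cnt

def solve_alt (max_x : Int) (max_y : Int) : List Int :=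
  let cats : Int × Int × Int := (0, 0, 0)
  let cats := (PySem.List.pyRange 1 (max_x + 1) 1).foldl (fun cats w =>
    (PySem.List.pyRange 1 (max_y + 1) 1).foldl (fun cats h =>
      let g : Int := Int.gcd w h        -- math.gcd, exact here (w, h ≥ 1)
      let diag := (w + 1) * (h + 1) - (g + 1) - 2
      let right := 4 + 2 * quadEq 1 (w - 1) (-w) (h * h) + 2 * quadEq 1 (h - 1) (-h) (w * w)
      let obtuse := 2 * diag + 2 * quadLt 1 (w - 1) (-w) (h * h) + 2 * quadLt 1 (h - 1) (-h) (w * w)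
      let ro := (PySem.List.pyRange 1 h 1).foldl (fun ro y =>
        (ro.1 + 4 * quadEq 1 (w - 1) (-w) (h * h - h * y),
         ro.2 + 4 * quadLt 1 (w - 1) (-w) (h * h - h * y))) (right, obtuse)
      let ro := (PySem.List.pyRange 1 w 1).foldl (fun ro y =>
        (ro.1 + 4 * quadEq 1 (h - 1) (-h) (w * w - w * y),
         ro.2 + 4 * quadLt 1 (h - 1) (-h) (w * w - w * y))) ro
      let right := ro.1
      let obtuse := ro.2
      let triangles := 4 + 2 * diag + 2 * (w - 1) + 2 * (h - 1) + 4 * (w - 1) * (h - 1)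
      let p := (max_x + 1 - w) * (max_y + 1 - h)
      (cats.1 + (triangles - right - obtuse) * p, cats.2.1 + right * p, cats.2.2 + obtuse * p)) cats) cats
  let n := (max_x + 1) * (max_y + 1)
  [cats.1, cats.2.1, cats.2.2,
   PySem.Int.floordiv (n * (n - 1) * (n - 2)) 6 - (cats.1 + cats.2.1 + cats.2.2)]

-- ===== PRECONDITION & SPEC =====
def Spec_solve (max_x : Int) (max_y : Int) (out : List Int) : Prop := out = solve_alt max_x max_y
instance (max_x : Int) (max_y : Int) (out : List Int) : Decidable (Spec_solve max_x max_y out) := by unfold Spec_solve; infer_instance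

-- ===== CLAIM (what is proved, stated in full; the proofs are below) =====
def Claim_equal_solve : Prop := ∀ (max_x : Int) (max_y : Int), Dom_solve max_x max_y → Spec_solve max_x max_y (solve max_x max_y)

-- ===== LEMMAS AND PROOFS =====

theorem isqrtAux_spec (n : Nat) : ∀ (fuel lo hi : Nat), lo * lo ≤ n → n < hi * hi →
    lo < hi → hi - lo ≤ fuel →
    isqrtAux n fuel lo hi * isqrtAux n fuel lo hi ≤ n ∧
      n < (isqrtAux n fuel lo hi + 1) * (isqrtAux n fuel lo hi + 1) := by
  intro fuel
  induction fuel with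
  | zero => intro lo hi _ _ hlt hle; omega
  | succ f ih =>
    intro lo hi h1 h2 hlt hle
    simp only [isqrtAux]
    by_cases hm : (lo + hi) / 2 = lo
    · have hhi : hi = lo + 1 := by omega
      subst hhi
      simp only [hm, if_pos]
      exact ⟨h1, h2⟩
    · simp only [if_neg hm]
      by_cases hsq : (lo + hi) / 2 * ((lo + hi) / 2) ≤ n
      · simp only [if_pos hsq]
        exact ih _ _ hsq h2 (by omega) (by omega)
      · simp only [if_neg hsq]
        exact ih _ _ h1 (by omega) (by omega) (by omega)

theorem isqrt_spec (n : Nat) : isqrt n * isqrt n ≤ n ∧ n < (isqrt n + 1) * (isqrt n + 1) :=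
  isqrtAux_spec n (n + 1) 0 (n + 1) (by omega) (by nlinarith) (by omega) (by omega)

-- Int-level spec: for 0 ≤ N, with S = isqrt N.toNat, S*S ≤ N < (S+1)*(S+1) and 0 ≤ S
theorem isqrt_int_spec (N : Int) (hN : 0 ≤ N) :
    (isqrt N.toNat : Int) * (isqrt N.toNat : Int) ≤ N ∧
      N < ((isqrt N.toNat : Int) + 1) * ((isqrt N.toNat : Int) + 1) := by
  have h := isqrt_spec N.toNat
  constructor
  · have h1 := h.1
    have : ((isqrt N.toNat * isqrt N.toNat : Nat) : Int) ≤ (N.toNat : Int) := by exact_mod_cast h1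
    push_cast at this
    omega
  · have h2 := h.2
    have : (N.toNat : Int) < (((isqrt N.toNat + 1) * (isqrt N.toNat + 1) : Nat) : Int) := by exact_mod_cast h2
    push_cast at this
    omega

-- square bracket: m*m ≤ N ↔ |m| ≤ S  (0 ≤ N)
theorem sq_le_iff_abs_le (N m : Int) (hN : 0 ≤ N) :
    m * m ≤ N ↔ (-(isqrt N.toNat : Int) ≤ m ∧ m ≤ (isqrt N.toNat : Int)) := by
  obtain ⟨h1, h2⟩ := isqrt_int_spec N hN
  set S : Int := (isqrt N.toNat : Int) with hS
  have hS0 : 0 ≤ S := by positivity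
  constructor
  · intro hm
    constructor <;> nlinarith
  · intro ⟨hl, hr⟩
    nlinarith


theorem quadLt_eq_card (lo hi b c : Int) :
    quadLt lo hi b c =
      (((Finset.Icc lo hi).filter (fun x => x * x + b * x + c < 0)).card : Int) := by
  unfold quadLt
  by_cases hD : b * b - 4 * c ≤ 0
  · simp only [if_pos hD]
    rw [Finset.filter_false_of_mem, Finset.card_empty]
    · rfl
    · intro x _
      have key : (2*x+b)*(2*x+b) = 4*(x*x+b*x+c) + (b*b-4*c) := by ring
      have h0 : 0 ≤ (2*x+b)*(2*x+b) := mul_self_nonneg _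
      intro hc
      linarith
  · simp only [if_neg hD]
    set t : Int := (isqrt (b*b-4*c - 1).toNat : Int) with ht
    have habs := fun m => sq_le_iff_abs_le (b*b-4*c-1) m (by omega)
    have hfilter : (Finset.Icc lo hi).filter (fun x => x * x + b * x + c < 0)
        = Finset.Icc (max lo (-(PySem.Int.floordiv (t + b) 2))) (min hi (PySem.Int.floordiv (t - b) 2)) := by
      ext x
      simp only [Finset.mem_filter, Finset.mem_Icc, le_max_iff, min_le_iff, max_le_iff, le_min_iff]
      have key : (2*x+b)*(2*x+b) = 4*(x*x+b*x+c) + (b*b-4*c) := by ring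
      have h1 : x ≤ PySem.Int.floordiv (t - b) 2 ↔ x * 2 ≤ t - b :=
        PySem.Int.le_floordiv_iff_mul_le (by omega)
      have h2 : -x ≤ PySem.Int.floordiv (t + b) 2 ↔ (-x) * 2 ≤ t + b :=
        PySem.Int.le_floordiv_iff_mul_le (by omega)
      have h3 := habs (2*x+b)
      constructor
      · rintro ⟨⟨hxl, hxr⟩, hlt⟩
        have : (2*x+b)*(2*x+b) ≤ b*b-4*c-1 := by linarith
        rw [h3] at this
        exact ⟨⟨hxl, by omega⟩, hxr, by omega⟩
      · rintro ⟨⟨hxl, hxg⟩, hxr, hxh⟩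
        have : (2*x+b)*(2*x+b) ≤ b*b-4*c-1 := h3.mpr (by omega)
        exact ⟨⟨hxl, hxr⟩, by linarith⟩
    rw [hfilter, Int.card_Icc]
    omega


theorem quadEq_eq_card (lo hi b c : Int) :
    quadEq lo hi b c =
      (((Finset.Icc lo hi).filter (fun x => x * x + b * x + c = 0)).card : Int) := by
  unfold quadEq
  by_cases hD : b * b - 4 * c < 0
  · simp only [if_pos hD]
    rw [Finset.filter_false_of_mem, Finset.card_empty]
    · rfl
    · intro x _ hc
      have key : (2*x+b)*(2*x+b) = 4*(x*x+b*x+c) + (b*b-4*c) := by ring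
      have h0 : 0 ≤ (2*x+b)*(2*x+b) := mul_self_nonneg _
      linarith
  · simp only [if_neg hD]
    set s : Int := (isqrt (b*b-4*c).toNat : Int) with hs
    obtain ⟨hs1, hs2⟩ := isqrt_int_spec (b*b-4*c) (by omega)
    rw [← hs] at hs1 hs2
    have hs0 : 0 ≤ s := by positivity
    by_cases hbad : s * s ≠ b * b - 4 * c ∨ PySem.Int.mod (s - b) 2 ≠ 0
    · simp only [if_pos hbad]
      rw [Finset.filter_false_of_mem, Finset.card_empty]
      · rfl
      · intro x _ hc
        have key : (2*x+b)*(2*x+b) = 4*(x*x+b*x+c) + (b*b-4*c) := by ring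
        rw [hc] at key; ring_nf at key
        -- so (2x+b)^2 = D; hence s = |2x+b| and parity of s-b is even
        have habs : (2*x+b)*(2*x+b) = b*b-4*c := by linarith
        have hm0 : s = 2*x+b ∨ s = -(2*x+b) := by
          rcases le_total 0 (2*x+b) with hp | hn
          · left; nlinarith
          · right; nlinarith
        have hmod : PySem.Int.mod (s - b) 2 = (s - b) % 2 :=
          PySem.Int.mod_eq_emod_of_pos (by omega)
        rcases hbad with hb1 | hb2
        · rcases hm0 with h | h <;> rw [h] at hb1 <;> exact hb1 (by linarith [habs] <;> ring_nf)
        · rw [hmod] at hb2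
          rcases hm0 with h | h <;> omega
    · simp only [if_neg hbad]
      push_neg at hbad
      obtain ⟨hsq, hpar⟩ := hbad
      rw [PySem.Int.mod_eq_emod_of_pos (by omega)] at hpar
      set r1 := PySem.Int.floordiv (-b - s) 2 with hr1
      set r2 := PySem.Int.floordiv (-b + s) 2 with hr2
      have he1 : 2 ∣ (-b - s) := by omega
      have he2 : 2 ∣ (-b + s) := by omega
      have hr1v : 2 * r1 = -b - s := by
        rw [hr1, PySem.Int.floordiv_eq_ediv_of_pos (by omega)]
        omega
      have hr2v : 2 * r2 = -b + s := by
        rw [hr2, PySem.Int.floordiv_eq_ediv_of_pos (by omega)]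
        omega
      have hroot : ∀ x : Int, x * x + b * x + c = 0 ↔ (x = r1 ∨ x = r2) := by
        intro x
        have key : (2*x+b)*(2*x+b) = 4*(x*x+b*x+c) + (b*b-4*c) := by ring
        constructor
        · intro hc
          have habs : (2*x+b)*(2*x+b) = s * s := by rw [hsq]; linarith
          have : 2*x+b = s ∨ 2*x+b = -s := by
            rcases mul_self_eq_mul_self_iff.mp habs with h | h
            · exact Or.inl h
            · exact Or.inr h
          omega
        · intro hx
          have : 2*x+b = -s ∨ 2*x+b = s := by omega
          have hss : (2*x+b)*(2*x+b) = s*s := by rcases this with h | h <;> rw [h] <;> ring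
          rw [hsq] at hss
          linarith
      have hfe : (Finset.Icc lo hi).filter (fun x => x * x + b * x + c = 0)
          = (Finset.Icc lo hi).filter (fun x => x = r1 ∨ x = r2) := by
        apply Finset.filter_congr
        intro x _
        simp only [hroot x, decide_eq_true_eq]
      rw [hfe]
      by_cases heq : r2 = r1
      · simp only [heq, or_self]
        rw [Finset.filter_eq']
        by_cases hmem : r1 ∈ Finset.Icc lo hi
        · simp only [if_pos hmem, Finset.card_singleton]
          simp only [Finset.mem_Icc] at hmem
          simp [heq, hmem.1, hmem.2]
        · simp only [if_neg hmem, Finset.card_empty]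
          simp only [Finset.mem_Icc, not_and_or, not_le] at hmem
          have : ¬ (lo ≤ r1 ∧ r1 ≤ hi) := by omega
          simp [heq, this]
      · have hsplit : (Finset.Icc lo hi).filter (fun x => x = r1 ∨ x = r2)
            = ((Finset.Icc lo hi).filter (fun x => x = r1)) ∪ ((Finset.Icc lo hi).filter (fun x => x = r2)) := by
          rw [← Finset.filter_or]
        rw [hsplit, Finset.card_union_of_disjoint]
        · rw [Finset.filter_eq', Finset.filter_eq']
          by_cases hm1 : r1 ∈ Finset.Icc lo hi <;> by_cases hm2 : r2 ∈ Finset.Icc lo hi <;>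
            simp only [Finset.mem_Icc] at hm1 hm2 <;>
            simp [hm1, hm2, heq] <;> omega
        · simp only [Finset.disjoint_filter]
          intro x _ h1 h2
          exact heq (by omega)

theorem sum_Icc_top (a b : Int) (g : Int → Int) (h : a ≤ b + 1) :
    ∑ x ∈ Finset.Icc a (b+1), g x = (∑ x ∈ Finset.Icc a b, g x) + g (b+1) := by
  have : Finset.Icc a (b+1) = insert (b+1) (Finset.Icc a b) := by
    ext x; simp [Finset.mem_Icc]; omega
  rw [this, Finset.sum_insert (by simp [Finset.mem_Icc])]
  ring

-- sum over pyRange as Finset sum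
theorem sum_map_pyRange (g : Int → Int) (a b : Int) :
    ((PySem.List.pyRange a b 1).map g).sum = ∑ x ∈ Finset.Icc a (b - 1), g x := by
  by_cases hab : b ≤ a
  · rw [PySem.List.pyRange_one_eq_nil hab]
    rw [Finset.Icc_eq_empty (by omega)]
    simp
  · push_neg at hab
    obtain ⟨n, hn⟩ : ∃ n : Nat, b = a + 1 + n := ⟨(b - a - 1).toNat, by omega⟩
    subst hn
    induction n with
    | zero =>
      rw [show a + 1 + (0:Nat) = a + 1 by omega, PySem.List.pyRange_one_singleton]
      simp
    | succ k ih =>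
      have h1 : a + 1 + (k+1:Nat) = (a + 1 + k) + 1 := by push_cast; ring
      rw [h1, PySem.List.pyRange_one_succ_right (by omega)]
      rw [List.map_append, List.sum_append]
      rw [ih (by omega)]
      rw [show a + 1 + (k:Int) + 1 - 1 = (a + 1 + (k:Int) - 1) + 1 from by ring,
        sum_Icc_top _ _ _ (by omega)]
      have h3 : a + 1 + (k:Int) - 1 + 1 = a + 1 + (k:Int) := by ring
      rw [h3]
      simp

-- Fubini for counting
theorem sum_card_comm (s t : Finset Int) (P : Int → Int → Prop) [∀ x y, Decidable (P x y)] :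
    ∑ x ∈ s, ((t.filter (fun y => P x y)).card : Int)
      = ∑ y ∈ t, ((s.filter (fun x => P x y)).card : Int) := by
  have h1 : ∀ x, ((t.filter (fun y => P x y)).card : Int) = ∑ y ∈ t, if P x y then (1:Int) else 0 := by
    intro x
    rw [Finset.card_filter]
    push_cast
    rfl
  have h2 : ∀ y, ((s.filter (fun x => P x y)).card : Int) = ∑ x ∈ s, if P x y then (1:Int) else 0 := by
    intro y
    rw [Finset.card_filter]
    push_cast
    rfl
  simp only [h1, h2]
  exact Finset.sum_comm

-- A's count_side_side per-column bookkeeping, as row counts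
theorem c2_card (H num : Int) (hH : 0 < H) :
    (max 0 (H - 1 - max 0 (min H (PySem.Int.floordiv num H))) : Int)
      = (((Finset.Icc 1 (H-1)).filter (fun y => num - H * y < 0)).card : Int) := by
  have hq := PySem.Int.floordiv_eq_iff_of_pos (a := num) (b := H) (q := PySem.Int.floordiv num H) hH
  have hqv : PySem.Int.floordiv num H * H ≤ num ∧ num < (PySem.Int.floordiv num H + 1) * H := hq.mp rfl
  set q := PySem.Int.floordiv num H with hqdef
  have hfilter : (Finset.Icc 1 (H-1)).filter (fun y => num - H * y < 0)
      = Finset.Icc (max 1 (q + 1)) (H - 1) := by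
    ext y
    simp only [Finset.mem_filter, Finset.mem_Icc, max_le_iff]
    constructor
    · rintro ⟨⟨h1, h2⟩, h3⟩
      refine ⟨⟨h1, ?_⟩, h2⟩
      nlinarith
    · rintro ⟨⟨h1, h2⟩, h3⟩
      refine ⟨⟨h1, h3⟩, ?_⟩
      nlinarith
  rw [hfilter, Int.card_Icc]
  omega

theorem c1_card (H num : Int) (hH : 0 < H) :
    ((if 0 < max 0 (min H (PySem.Int.floordiv num H)) ∧ max 0 (min H (PySem.Int.floordiv num H)) < H
        ∧ PySem.Int.mod num H = 0 then (0:Int) + 1 else 0))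
      = (((Finset.Icc 1 (H-1)).filter (fun y => num - H * y = 0)).card : Int) := by
  have hq := PySem.Int.floordiv_eq_iff_of_pos (a := num) (b := H) (q := PySem.Int.floordiv num H) hH
  have hqv : PySem.Int.floordiv num H * H ≤ num ∧ num < (PySem.Int.floordiv num H + 1) * H := hq.mp rfl
  rw [PySem.Int.mod_eq_emod_of_pos hH]
  set q := PySem.Int.floordiv num H with hqdef
  have hsol : ∀ y : Int, num - H * y = 0 ↔ (num % H = 0 ∧ y = q) := by
    intro y
    constructor
    · intro h
      have hy : num = H * y := by omega
      have hd : num % H = 0 := Int.emod_eq_zero_of_dvd ⟨y, hy⟩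
      have hyq : y = q := by
        have ha : q ≤ y := by nlinarith [hqv.1, hqv.2]
        have hb : y ≤ q := by nlinarith [hqv.1, hqv.2]
        omega
      exact ⟨hd, hyq⟩
    · rintro ⟨h1, rfl⟩
      obtain ⟨k, hk⟩ := Int.dvd_of_emod_eq_zero h1
      have ha : q ≤ k := by nlinarith [hqv.1, hqv.2]
      have hb : k ≤ q := by nlinarith [hqv.1, hqv.2]
      have hkq : k = q := by omega
      subst hkq
      omega
  by_cases hc : 0 < max 0 (min H q) ∧ max 0 (min H q) < H ∧ num % H = 0
  · rw [if_pos hc]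
    have hq01 : 0 < q ∧ q < H := by
      rcases hc with ⟨hc1, hc2, _⟩
      constructor <;> omega
    have : (Finset.Icc 1 (H-1)).filter (fun y => num - H * y = 0) = {q} := by
      ext y
      simp only [Finset.mem_filter, Finset.mem_Icc, Finset.mem_singleton, hsol y]
      constructor
      · rintro ⟨_, _, rfl⟩; rfl
      · rintro rfl
        exact ⟨⟨by omega, by omega⟩, hc.2.2, rfl⟩
    rw [this]; simp
  · rw [if_neg hc]
    rw [Finset.filter_false_of_mem, Finset.card_empty]
    · rfl
    · intro y hy
      simp only [Finset.mem_Icc] at hy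
      rw [hsol y]
      rintro ⟨hm, rfl⟩
      -- y = q in [1, H-1] so clamp is q itself, contradicting hc
      exact hc ⟨by omega, by omega, hm⟩

-- ===== fold machinery =====
theorem foldl4_add (l : List Int) (f1 f2 f3 f4 : Int → Int) (s : Int × Int × Int × Int) :
    l.foldl (fun ws x => (ws.1 + f1 x, ws.2.1 + f2 x, ws.2.2.1 + f3 x, ws.2.2.2 + f4 x)) s
      = (s.1 + (l.map f1).sum, s.2.1 + (l.map f2).sum, s.2.2.1 + (l.map f3).sum,
         s.2.2.2 + (l.map f4).sum) := by
  induction l generalizing s with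
  | nil => simp
  | cons x xs ih =>
    simp only [List.foldl_cons, List.map_cons, List.sum_cons]
    rw [ih]
    obtain ⟨a, b, c, d⟩ := s
    simp only [Prod.mk.injEq]
    refine ⟨by ring, by ring, by ring, by ring⟩

theorem foldl2_add (l : List Int) (f1 f2 : Int → Int) (s : Int × Int) :
    l.foldl (fun ro y => (ro.1 + f1 y, ro.2 + f2 y)) s
      = (s.1 + (l.map f1).sum, s.2 + (l.map f2).sum) := by
  induction l generalizing s with
  | nil => simp
  | cons x xs ih =>
    simp only [List.foldl_cons, List.map_cons, List.sum_cons]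
    rw [ih]
    obtain ⟨a, b⟩ := s
    simp only [Prod.mk.injEq]
    exact ⟨by ring, by ring⟩

theorem foldl_rel {γ α β : Type} (R : α → β → Prop) (l : List γ) (f : α → γ → α) (g : β → γ → β)
    (hstep : ∀ a b x, x ∈ l → R a b → R (f a x) (g b x)) :
    ∀ a b, R a b → R (l.foldl f a) (l.foldl g b) := by
  induction l with
  | nil => intro a b h; exact h
  | cons x xs ih =>
    intro a b h
    exact ih (fun a' b' y hy h' => hstep a' b' y (List.mem_cons_of_mem _ hy) h') _ _
      (hstep a b x List.mem_cons_self h)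

-- ===== counting identities =====
theorem corner_eq (W H : Int) :
    (∑ x ∈ Finset.Icc 1 (W - 1), (if x * x + H * H - W * x = 0 then (2:Int) else 0))
      = 2 * quadEq 1 (W - 1) (-W) (H * H) := by
  rw [quadEq_eq_card]
  rw [Finset.sum_congr rfl (fun x _ => show (if x * x + H * H - W * x = 0 then (2:Int) else 0)
      = 2 * (if x * x + (-W) * x + H * H = 0 then (1:Int) else 0) from by
    rw [show x * x + H * H - W * x = x * x + (-W) * x + H * H from by ring]
    split_ifs <;> ring)]
  rw [← Finset.mul_sum, Finset.sum_boole]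

theorem corner_lt (W H : Int) :
    (∑ x ∈ Finset.Icc 1 (W - 1), (if x * x + H * H - W * x < 0 then (2:Int) else 0))
      = 2 * quadLt 1 (W - 1) (-W) (H * H) := by
  rw [quadLt_eq_card]
  rw [Finset.sum_congr rfl (fun x _ => show (if x * x + H * H - W * x < 0 then (2:Int) else 0)
      = 2 * (if x * x + (-W) * x + H * H < 0 then (1:Int) else 0) from by
    rw [show x * x + H * H - W * x = x * x + (-W) * x + H * H from by ring]
    split_ifs <;> ring)]
  rw [← Finset.mul_sum, Finset.sum_boole]

theorem ss_eq (W H : Int) (hH : 0 < H) :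
    (∑ x ∈ Finset.Icc 1 (W - 1), (4:Int) * (if 0 < max 0 (min H (PySem.Int.floordiv (x * x + H * H - W * x) H))
        ∧ max 0 (min H (PySem.Int.floordiv (x * x + H * H - W * x) H)) < H
        ∧ PySem.Int.mod (x * x + H * H - W * x) H = 0 then (0:Int) + 1 else 0))
      = ∑ y ∈ Finset.Icc 1 (H - 1), (4:Int) * quadEq 1 (W - 1) (-W) (H * H - H * y) := by
  rw [Finset.sum_congr rfl (fun x _ => by rw [c1_card H (x * x + H * H - W * x) hH])]
  rw [← Finset.mul_sum, sum_card_comm (Finset.Icc 1 (W - 1)) (Finset.Icc 1 (H - 1))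
    (fun x y => x * x + H * H - W * x - H * y = 0), Finset.mul_sum]
  apply Finset.sum_congr rfl
  intro y _
  rw [quadEq_eq_card]
  congr 2
  exact congrArg Finset.card
    (Finset.filter_congr (fun x _ => by constructor <;> intro hx <;> linarith))

theorem ss_lt (W H : Int) (hH : 0 < H) :
    (∑ x ∈ Finset.Icc 1 (W - 1), (4:Int) * max 0 (H - 1 - max 0 (min H (PySem.Int.floordiv (x * x + H * H - W * x) H))))
      = ∑ y ∈ Finset.Icc 1 (H - 1), (4:Int) * quadLt 1 (W - 1) (-W) (H * H - H * y) := by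
  rw [Finset.sum_congr rfl (fun x _ => by rw [c2_card H (x * x + H * H - W * x) hH])]
  rw [← Finset.mul_sum, sum_card_comm (Finset.Icc 1 (W - 1)) (Finset.Icc 1 (H - 1))
    (fun x y => x * x + H * H - W * x - H * y < 0), Finset.mul_sum]
  apply Finset.sum_congr rfl
  intro y _
  rw [quadLt_eq_card]
  congr 2
  exact congrArg Finset.card
    (Finset.filter_congr (fun x _ => by constructor <;> intro hx <;> linarith))

-- relation between A's 4-slot cats and B's 3 accumulators
def Rcats (a : Int × Int × Int × Int) (b : Int × Int × Int) : Prop :=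
  a.1 = b.1 ∧ a.2.1 = b.2.1 ∧ a.2.2.1 = b.2.2 ∧ a.2.2.2 = 0

theorem dot_fold (W H : Int) (l : List Int) (s : Int × Int × Int × Int) :
    l.foldl (fun ws x =>
      if x * x + H * H - W * x < 0 then (ws.1, ws.2.1, ws.2.2.1 + 2, ws.2.2.2)
      else if x * x + H * H - W * x = 0 then (ws.1, ws.2.1 + 2, ws.2.2.1, ws.2.2.2)
      else ws) s
    = (s.1, s.2.1 + (l.map (fun x => if x * x + H * H - W * x = 0 then (2:Int) else 0)).sum,
       s.2.2.1 + (l.map (fun x => if x * x + H * H - W * x < 0 then (2:Int) else 0)).sum,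
       s.2.2.2) := by
  rw [show (fun (ws : Int × Int × Int × Int) (x : Int) =>
      if x * x + H * H - W * x < 0 then (ws.1, ws.2.1, ws.2.2.1 + 2, ws.2.2.2)
      else if x * x + H * H - W * x = 0 then (ws.1, ws.2.1 + 2, ws.2.2.1, ws.2.2.2)
      else ws)
    = (fun ws x => (ws.1 + (fun (_ : Int) => (0:Int)) x,
        ws.2.1 + (fun x => if x * x + H * H - W * x = 0 then (2:Int) else 0) x,
        ws.2.2.1 + (fun x => if x * x + H * H - W * x < 0 then (2:Int) else 0) x,
        ws.2.2.2 + (fun (_ : Int) => (0:Int)) x)) from by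
    funext ws x
    dsimp only
    split_ifs <;> simp [Prod.ext_iff] <;> omega]
  rw [foldl4_add]
  simp

theorem ss_fold (W H : Int) (l : List Int) (s : Int × Int × Int × Int) :
    l.foldl (fun ws x =>
      (ws.1, ws.2.1 + 4 * (if 0 < max 0 (min H (PySem.Int.floordiv (x * x + H * H - W * x) H))
          ∧ max 0 (min H (PySem.Int.floordiv (x * x + H * H - W * x) H)) < H
          ∧ PySem.Int.mod (x * x + H * H - W * x) H = 0 then (0:Int) + 1 else 0),
       ws.2.2.1 + 4 * max 0 (H - 1 - max 0 (min H (PySem.Int.floordiv (x * x + H * H - W * x) H))),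
       ws.2.2.2)) s
    = (s.1, s.2.1 + (l.map (fun x => 4 * (if 0 < max 0 (min H (PySem.Int.floordiv (x * x + H * H - W * x) H))
          ∧ max 0 (min H (PySem.Int.floordiv (x * x + H * H - W * x) H)) < H
          ∧ PySem.Int.mod (x * x + H * H - W * x) H = 0 then (0:Int) + 1 else 0))).sum,
       s.2.2.1 + (l.map (fun x => 4 * max 0 (H - 1 - max 0 (min H (PySem.Int.floordiv (x * x + H * H - W * x) H))))).sum,
       s.2.2.2) := by
  rw [show (fun (ws : Int × Int × Int × Int) (x : Int) =>
      (ws.1, ws.2.1 + 4 * (if 0 < max 0 (min H (PySem.Int.floordiv (x * x + H * H - W * x) H))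
          ∧ max 0 (min H (PySem.Int.floordiv (x * x + H * H - W * x) H)) < H
          ∧ PySem.Int.mod (x * x + H * H - W * x) H = 0 then (0:Int) + 1 else 0),
       ws.2.2.1 + 4 * max 0 (H - 1 - max 0 (min H (PySem.Int.floordiv (x * x + H * H - W * x) H))),
       ws.2.2.2))
    = (fun ws x => (ws.1 + (fun (_ : Int) => (0:Int)) x,
        ws.2.1 + (fun x => 4 * (if 0 < max 0 (min H (PySem.Int.floordiv (x * x + H * H - W * x) H))
          ∧ max 0 (min H (PySem.Int.floordiv (x * x + H * H - W * x) H)) < H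
          ∧ PySem.Int.mod (x * x + H * H - W * x) H = 0 then (0:Int) + 1 else 0)) x,
        ws.2.2.1 + (fun x => 4 * max 0 (H - 1 - max 0 (min H (PySem.Int.floordiv (x * x + H * H - W * x) H)))) x,
        ws.2.2.2 + (fun (_ : Int) => (0:Int)) x)) from by
    funext ws x
    simp [Prod.ext_iff]]
  rw [foldl4_add]
  simp

theorem stepAB (mx my w y : Int) (hw : 1 ≤ w) (hy : 1 ≤ y)
    (a : Int × Int × Int × Int) (b : Int × Int × Int) (hab : Rcats a b) :
    Rcats
      (let triangles : Int := 0
       let ways : Int × Int × Int × Int := (0, 0, 0, 0)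
       let triangles := triangles + 4
       let ways := (ways.1, ways.2.1 + 4, ways.2.2.1, ways.2.2.2)
       let g : Int := Int.gcd w y
       let num_points := (w + 1) * (y + 1) - (g + 1) - 2
       let triangles := triangles + num_points * 2
       let ways := (ways.1, ways.2.1, ways.2.2.1 + num_points * 2, ways.2.2.2)
       let triangles := triangles + 2 * (w - 1)
       let ways := (PySem.List.pyRange 1 w 1).foldl (fun ws x =>
         let dot := x * x + y * y - w * x
         if dot < 0 then (ws.1, ws.2.1, ws.2.2.1 + 2, ws.2.2.2)
         else if dot = 0 then (ws.1, ws.2.1 + 2, ws.2.2.1, ws.2.2.2)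
         else ws) ways
       let triangles := triangles + 2 * (y - 1)
       let ways := (PySem.List.pyRange 1 y 1).foldl (fun ws x =>
         let dot := x * x + w * w - y * x
         if dot < 0 then (ws.1, ws.2.1, ws.2.2.1 + 2, ws.2.2.2)
         else if dot = 0 then (ws.1, ws.2.1 + 2, ws.2.2.1, ws.2.2.2)
         else ws) ways
       let ways := count_side_side ways w y
       let ways := count_side_side ways y w
       let triangles := triangles + 4 * (w - 1) * (y - 1)
       let ways := (triangles - ways.2.1 - ways.2.2.1, ways.2.1, ways.2.2.1, ways.2.2.2)
       let placements := (mx + 1 - w) * (my + 1 - y)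
       (a.1 + ways.1 * placements, a.2.1 + ways.2.1 * placements,
        a.2.2.1 + ways.2.2.1 * placements, a.2.2.2 + ways.2.2.2 * placements))
      (let g : Int := Int.gcd w y
       let diag := (w + 1) * (y + 1) - (g + 1) - 2
       let right := 4 + 2 * quadEq 1 (w - 1) (-w) (y * y) + 2 * quadEq 1 (y - 1) (-y) (w * w)
       let obtuse := 2 * diag + 2 * quadLt 1 (w - 1) (-w) (y * y) + 2 * quadLt 1 (y - 1) (-y) (w * w)
       let ro := (PySem.List.pyRange 1 y 1).foldl (fun ro yy =>
         (ro.1 + 4 * quadEq 1 (w - 1) (-w) (y * y - y * yy),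
          ro.2 + 4 * quadLt 1 (w - 1) (-w) (y * y - y * yy))) (right, obtuse)
       let ro := (PySem.List.pyRange 1 w 1).foldl (fun ro yy =>
         (ro.1 + 4 * quadEq 1 (y - 1) (-y) (w * w - w * yy),
          ro.2 + 4 * quadLt 1 (y - 1) (-y) (w * w - w * yy))) ro
       let right := ro.1
       let obtuse := ro.2
       let triangles := 4 + 2 * diag + 2 * (w - 1) + 2 * (y - 1) + 4 * (w - 1) * (y - 1)
       let p := (mx + 1 - w) * (my + 1 - y)
       (b.1 + (triangles - right - obtuse) * p, b.2.1 + right * p, b.2.2 + obtuse * p)) := by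
  obtain ⟨ha1, ha2, ha3, ha4⟩ := hab
  dsimp only
  unfold count_side_side
  rw [dot_fold w y, dot_fold y w, ss_fold w y, ss_fold y w, foldl2_add, foldl2_add]
  dsimp only
  simp only [sum_map_pyRange]
  rw [corner_eq w y, corner_lt w y, corner_eq y w, corner_lt y w,
    ss_eq w y (by omega), ss_lt w y (by omega), ss_eq y w (by omega), ss_lt y w (by omega)]
  refine ⟨?_, ?_, ?_, ?_⟩
  · rw [ha1]; ring
  · rw [ha2]; ring
  · rw [ha3]; ring
  · rw [ha4]; ring

theorem final_of_R (mx my : Int) (A4 : Int × Int × Int × Int) (B3 : Int × Int × Int)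
    (h : Rcats A4 B3) :
    [A4.1, A4.2.1, A4.2.2.1,
      nc3 ((mx + 1) * (my + 1)) - (A4.1 + A4.2.1 + A4.2.2.1 + A4.2.2.2)]
    = [B3.1, B3.2.1, B3.2.2,
      PySem.Int.floordiv (((mx + 1) * (my + 1)) * ((mx + 1) * (my + 1) - 1) * ((mx + 1) * (my + 1) - 2)) 6
        - (B3.1 + B3.2.1 + B3.2.2)] := by
  obtain ⟨h1, h2, h3, h4⟩ := h
  rw [h1, h2, h3, h4]
  unfold nc3
  norm_num


theorem solve_eq_alt (mx my : Int) : solve mx my = solve_alt mx my := by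
  unfold solve solve_alt
  exact final_of_R mx my _ _
    (foldl_rel Rcats (PySem.List.pyRange 1 (mx + 1) 1) _ _
      (fun a b w hw hab =>
        foldl_rel Rcats (PySem.List.pyRange 1 (my + 1) 1) _ _
          (fun a' b' y hy hab' =>
            stepAB mx my w y ((PySem.List.mem_pyRange_one.mp hw).1)
              ((PySem.List.mem_pyRange_one.mp hy).1) a' b' hab') a b hab)
      _ _ ⟨rfl, rfl, rfl, rfl⟩)

-- ===== VERDICT (by name: the statement is the Claim_ definition above) =====
theorem solve_spec : Claim_equal_solve := by
  intro mx my _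
  unfold Spec_solve
  exact solve_eq_alt mx my
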